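-- pv_equiv track=rewrite | github.com/DenSul/pipepost | pipepost/runners/go_lesson.py | _determine_next_topic
-- ===== SOURCE A (Python) =====
-- PROGRESSION = [
--     "Variables and Types",
--     "Functions",
--     "Control Flow (if/switch/for)",
--     "Arrays and Slices",
--     "Maps",
--     "Structs",
--     "Methods",
--     "Interfaces",
--     "Error Handling",
--     "Goroutines",
--     "Channels",
--     "Select Statement",
--     "Sync Package (Mutex, WaitGroup)",
--     "Context Package",
--     "Testing",
--     "HTTP Server",
--     "JSON Handling",
--     "File I/O",
--     "Database (sql package)",
--     "Generics",
--     "Design Patterns in Go",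
-- ]
--
-- def _determine_next_topic(existing_titles: list[str]) -> str | None:
--     """Pick the first topic from PROGRESSION not covered by existing titles."""
--     existing_lower = [t.lower() for t in existing_titles]
--     for topic in PROGRESSION:
--         topic_lower = topic.lower()
--         if any(topic_lower in title for title in existing_lower):
--             continue
--         return topic
--     return None
-- ===== SOURCE B (Python) =====
-- PROGRESSION = [
--     "Variables and Types",
--     "Functions",
--     "Control Flow (if/switch/for)",
--     "Arrays and Slices",
--     "Maps",
--     "Structs",
--     "Methods",
--     "Interfaces",
--     "Error Handling",
--     "Goroutines",
--     "Channels",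
--     "Select Statement",
--     "Sync Package (Mutex, WaitGroup)",
--     "Context Package",
--     "Testing",
--     "HTTP Server",
--     "JSON Handling",
--     "File I/O",
--     "Database (sql package)",
--     "Generics",
--     "Design Patterns in Go",
-- ]
--
-- def _determine_next_topic(existing_titles: list[str]) -> str | None:
--     """Build a coverage set in one pass over the titles, then scan PROGRESSION."""
--     covered = set()
--     for title in existing_titles:
--         title_lower = title.lower()
--         for topic in PROGRESSION:
--             if topic.lower() in title_lower:
--                 covered.add(topic)
--     for topic in PROGRESSION:
--         if topic not in covered:
--             return topic
--     return None
-- ===== Notes on version B (the rewrite author's own statement) =====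
-- stated objective: alternative
-- what changed: B first builds a coverage set by scanning the titles once (marking every PROGRESSION topic whose lowercase form occurs in each title), then does a separate membership-only scan of PROGRESSION, instead of A's per-topic rescan of all titles with an early return.
import Mathlib
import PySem

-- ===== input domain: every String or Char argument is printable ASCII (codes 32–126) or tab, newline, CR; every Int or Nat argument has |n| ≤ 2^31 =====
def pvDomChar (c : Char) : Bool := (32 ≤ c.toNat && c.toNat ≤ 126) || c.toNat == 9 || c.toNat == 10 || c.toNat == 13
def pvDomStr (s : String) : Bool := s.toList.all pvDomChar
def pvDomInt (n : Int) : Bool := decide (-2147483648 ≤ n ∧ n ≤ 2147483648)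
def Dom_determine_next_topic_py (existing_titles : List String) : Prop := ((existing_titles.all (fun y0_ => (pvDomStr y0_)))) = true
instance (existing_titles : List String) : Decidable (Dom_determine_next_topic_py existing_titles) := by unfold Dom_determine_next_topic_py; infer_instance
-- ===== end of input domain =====

-- B builds a coverage set in one pass over the titles, then scans PROGRESSION by membership,
-- instead of A's per-topic rescan of all titles with an early return (objective: alternative).

def PROGRESSION : List String :=
  ["Variables and Types", "Functions", "Control Flow (if/switch/for)",
   "Arrays and Slices", "Maps", "Structs", "Methods", "Interfaces",
   "Error Handling", "Goroutines", "Channels", "Select Statement",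
   "Sync Package (Mutex, WaitGroup)", "Context Package", "Testing",
   "HTTP Server", "JSON Handling", "File I/O", "Database (sql package)",
   "Generics", "Design Patterns in Go"]

-- ===== PORT A =====
-- the 'for topic in PROGRESSION' loop with continue/early return
def aLoop (existing_lower : List String) : List String → Option String
  | [] => none
  | topic :: rest =>
    let topic_lower := PySem.Str.lower topic
    if existing_lower.any (fun title => PySem.Str.isIn topic_lower title) then
      aLoop existing_lower rest
    else some topic

def determine_next_topic_py (existing_titles : List String) : Option String :=
  let existing_lower := existing_titles.map PySem.Str.lower
  aLoop existing_lower PROGRESSION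

-- ===== PORT B =====
-- first pass: for each title, add every topic whose lowercase form occurs in it
def bCovered (existing_titles : List String) : PySem.Set String :=
  existing_titles.foldl (fun covered title =>
    let title_lower := PySem.Str.lower title
    PROGRESSION.foldl (fun covered topic =>
      if PySem.Str.isIn (PySem.Str.lower topic) title_lower then PySem.Set.add covered topic
      else covered) covered) PySem.Set.empty

-- second pass: first topic not in the coverage set
def bLoop (covered : PySem.Set String) : List String → Option String
  | [] => none
  | topic :: rest =>
    if ¬ PySem.Set.contains covered topic then some topic else bLoop covered rest

def determine_next_topic_py_alt (existing_titles : List String) : Option String :=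
  bLoop (bCovered existing_titles) PROGRESSION

-- ===== PRECONDITION & SPEC =====
def Spec_determine_next_topic_py (existing_titles : List String) (out : Option String) : Prop := out = determine_next_topic_py_alt existing_titles
instance (existing_titles : List String) (out : Option String) : Decidable (Spec_determine_next_topic_py existing_titles out) := by unfold Spec_determine_next_topic_py; infer_instance

-- ===== CLAIM (what is proved, stated in full; the proofs are below) =====
def Claim_equal_determine_next_topic_py : Prop := ∀ (existing_titles : List String), Dom_determine_next_topic_py existing_titles → Spec_determine_next_topic_py existing_titles (determine_next_topic_py existing_titles)

-- ===== LEMMAS AND PROOFS =====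

-- membership after the inner fold over PROGRESSION
lemma mem_inner_fold (x : String) (p : String → Bool) (topics : List String)
    (cov : PySem.Set String) :
    x ∈ topics.foldl (fun c t => if p t then PySem.Set.add c t else c) cov ↔
      x ∈ cov ∨ (x ∈ topics ∧ p x = true) := by
  induction topics generalizing cov with
  | nil => simp
  | cons t rest ih =>
    simp only [List.foldl_cons, List.mem_cons]
    by_cases hp : p t = true
    · simp only [hp, if_pos]
      rw [ih]
      simp only [PySem.Set.mem_add]
      constructor
      · rintro ((h | rfl) | ⟨hm, hx⟩)
        · exact Or.inl h
        · exact Or.inr ⟨Or.inl rfl, hp⟩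
        · exact Or.inr ⟨Or.inr hm, hx⟩
      · rintro (h | ⟨(rfl | hm), hx⟩)
        · exact Or.inl (Or.inl h)
        · exact Or.inl (Or.inr rfl)
        · exact Or.inr ⟨hm, hx⟩
    · simp only [hp, if_neg, Bool.false_eq_true, not_false_iff]
      rw [ih]
      constructor
      · rintro (h | ⟨hm, hx⟩)
        · exact Or.inl h
        · exact Or.inr ⟨Or.inr hm, hx⟩
      · rintro (h | ⟨(rfl | hm), hx⟩)
        · exact Or.inl h
        · exact absurd hx hp
        · exact Or.inr ⟨hm, hx⟩

-- membership in the coverage set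
lemma mem_bCovered (x : String) (titles : List String) :
    x ∈ bCovered titles ↔
      x ∈ PROGRESSION ∧
        ∃ title ∈ titles,
          PySem.Str.isIn (PySem.Str.lower x) (PySem.Str.lower title) = true := by
  unfold bCovered
  suffices h : ∀ (cov : PySem.Set String),
      x ∈ titles.foldl (fun covered title =>
        PROGRESSION.foldl (fun c t =>
          if PySem.Str.isIn (PySem.Str.lower t) (PySem.Str.lower title) then PySem.Set.add c t
          else c) covered) cov ↔
        x ∈ cov ∨ (x ∈ PROGRESSION ∧
          ∃ title ∈ titles,
            PySem.Str.isIn (PySem.Str.lower x) (PySem.Str.lower title) = true) by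
    rw [h PySem.Set.empty]
    simp [PySem.Set.empty]
  induction titles with
  | nil => simp
  | cons title rest ih =>
    intro cov
    simp only [List.foldl_cons]
    rw [ih, mem_inner_fold]
    constructor
    · rintro ((h | ⟨hm, hx⟩) | ⟨hm, t, ht, hx⟩)
      · exact Or.inl h
      · exact Or.inr ⟨hm, title, List.mem_cons_self .., hx⟩
      · exact Or.inr ⟨hm, t, List.mem_cons_of_mem _ ht, hx⟩
    · rintro (h | ⟨hm, t, ht, hx⟩)
      · exact Or.inl (Or.inl h)
      · rcases List.mem_cons.mp ht with rfl | ht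
        · exact Or.inl (Or.inr ⟨hm, hx⟩)
        · exact Or.inr ⟨hm, t, ht, hx⟩

-- the two scans agree on any suffix of PROGRESSION
lemma loops_agree (existing_titles : List String) (topics : List String)
    (hsub : ∀ t ∈ topics, t ∈ PROGRESSION) :
    aLoop (existing_titles.map PySem.Str.lower) topics =
      bLoop (bCovered existing_titles) topics := by
  induction topics with
  | nil => rfl
  | cons topic rest ih =>
    have htop : topic ∈ PROGRESSION := hsub topic (List.mem_cons_self ..)
    have hcov : PySem.Set.contains (bCovered existing_titles) topic = true ↔
        (existing_titles.map PySem.Str.lower).any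
          (fun title => PySem.Str.isIn (PySem.Str.lower topic) title) = true := by
      rw [PySem.Set.contains_iff, mem_bCovered]
      simp only [List.any_map, List.any_eq_true, Function.comp]
      exact ⟨fun ⟨_, h⟩ => h, fun h => ⟨htop, h⟩⟩
    simp only [aLoop, bLoop]
    by_cases hany : (existing_titles.map PySem.Str.lower).any
        (fun title => PySem.Str.isIn (PySem.Str.lower topic) title) = true
    · rw [if_pos hany, if_neg (not_not_intro (hcov.mpr hany)),
        ih (fun t ht => hsub t (List.mem_cons_of_mem _ ht))]
    · rw [if_neg hany, if_pos (fun hc => hany (hcov.mp hc))]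

-- ===== VERDICT (by name: the statement is the Claim_ definition above) =====
theorem determine_next_topic_py_spec : Claim_equal_determine_next_topic_py := by
  intro existing_titles _
  unfold Spec_determine_next_topic_py determine_next_topic_py determine_next_topic_py_alt
  exact loops_agree existing_titles PROGRESSION (fun t ht => ht)
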